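-- pv_equiv track=rewrite | github.com/sadtoni/bioinformatics | lab5/lab5_2.py | rebuild_sequence_greedy
-- ===== SOURCE A (Python) =====
-- def rebuild_sequence_greedy(samples, min_overlap):
--     """
--     Attempts to rebuild the sequence using a simple greedy overlap algorithm.
--     We are timing this function's (flawed) performance.
--     """
--     if not samples:
--         return ""
--
--     rebuilt_sequence = samples[0]
--     used_indices = {0}
--
--     while True:
--         best_overlap_len = -1
--         best_sample_index = -1
--
--         # This search tail is what we try to match
--         search_tail = rebuilt_sequence[-150:]
--
--         # This is the O(n^2) part:
--         # In each step, we check ALL remaining samples.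
--         for i in range(len(samples)):
--             if i in used_indices:
--                 continue
--
--             current_sample = samples[i]
--
--             # Check for best overlap for this sample
--             for overlap_len in range(min(len(search_tail), len(current_sample)), min_overlap - 1, -1):
--                 if search_tail.endswith(current_sample[:overlap_len]):
--                     if overlap_len > best_overlap_len:
--                         best_overlap_len = overlap_len
--                         best_sample_index = i
--                     break
--
--         if best_sample_index != -1:
--             best_sample = samples[best_sample_index]
--             rebuilt_sequence += best_sample[best_overlap_len:]
--             used_indices.add(best_sample_index)
--         else:
--             # Assembly is stuck
--             break
--
--     return rebuilt_sequence
-- ===== SOURCE B (Python) =====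
-- def rebuild_sequence_greedy(samples, min_overlap):
--     if not samples:
--         return ""
--     # Stage 1: build, once, a hash index mapping every prefix (length 0..150)
--     # of every sample to the ascending list of sample indices with that prefix.
--     index = {}
--     for i, s in enumerate(samples):
--         for k in range(0, min(len(s), 150) + 1):
--             index.setdefault(s[:k], []).append(i)
--     # Stage 2: greedy extension, but with the loops transposed: instead of a
--     # per-sample scan computing each sample's best overlap, walk overlap
--     # lengths from longest to shortest and resolve each length by one index
--     # lookup; the first hit is the globally best (length, earliest index).
--     rebuilt = samples[0]
--     used = {0}
--     lo = max(min_overlap, 0)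
--     while True:
--         tail = rebuilt[-150:]
--         hit = None
--         for k in range(len(tail), lo - 1, -1):
--             cands = index.get(tail[len(tail) - k:])
--             if cands:
--                 j = next((i for i in cands if i not in used), None)
--                 if j is not None:
--                     hit = (k, j)
--                     break
--         if hit is None:
--             break
--         k, j = hit
--         rebuilt += samples[j][k:]
--         used.add(j)
--     return rebuilt
-- ===== Notes on version B (the rewrite author's own statement) =====
-- stated objective: alternative
-- what changed: B precomputes once a hash index from every sample prefix (length 0..150) to the ascending list of sample indices carrying it, then transposes the greedy round: it walks overlap lengths from longest to shortest and resolves each length with a single dictionary lookup, so A's per-round scan over all samples (each with its own descending endswith loop) and its best-so-far bookkeeping disappear — the first hit is the answer; the trade is the up-front index build, which dominates when rounds are few.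
import Mathlib
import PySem

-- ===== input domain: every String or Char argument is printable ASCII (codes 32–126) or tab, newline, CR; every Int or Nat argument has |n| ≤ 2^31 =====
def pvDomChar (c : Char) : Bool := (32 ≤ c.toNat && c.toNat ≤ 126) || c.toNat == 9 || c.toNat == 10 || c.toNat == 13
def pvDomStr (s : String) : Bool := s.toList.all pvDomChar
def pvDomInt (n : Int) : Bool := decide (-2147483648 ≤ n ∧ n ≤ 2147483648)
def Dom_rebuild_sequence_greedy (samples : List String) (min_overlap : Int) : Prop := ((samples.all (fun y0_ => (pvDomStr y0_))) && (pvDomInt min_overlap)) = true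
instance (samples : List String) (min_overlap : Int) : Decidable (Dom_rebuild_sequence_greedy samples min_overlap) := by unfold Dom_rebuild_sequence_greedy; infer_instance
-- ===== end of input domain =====

-- B precomputes a hash index from every sample prefix (length ≤ 150) to the ascending list of
-- sample indices carrying it, and transposes the per-round search: overlap lengths are walked
-- from longest to shortest and resolved by one index lookup each, so A's per-round per-sample
-- inner scan and best-so-far bookkeeping disappear (an alternative algorithm, not a speed claim).

-- ===== PORT A =====
-- Both ports work on List Char (PySem.Chars); strings convert at the boundary.

-- 'for overlap_len in range(min(...), min_overlap - 1, -1): if search_tail.endswith(...): ... break'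
-- = the first (largest) matching overlap length, then the 'if overlap_len > best' update.
def pvA_inner (tail cur : List Char) (mo : Int) : Option Int :=
  (PySem.List.pyRange (min (tail.length : Int) (cur.length : Int)) (mo - 1) (-1)).find?
    (fun k => PySem.Chars.endswith tail (PySem.List.slice cur none (some k)))

-- 'for i in range(len(samples)): if i in used_indices: continue; ...'
def pvA_select (S : List (List Char)) (tail : List Char) (mo : Int)
    (used : PySem.Set Int) : Int × Int :=
  (PySem.List.pyRange 0 (S.length : Int) 1).foldl
    (fun best i =>
      if PySem.Set.contains used i then best
      else
        match pvA_inner tail (PySem.List.pyGetD S i []) mo with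
        | some k => if k > best.1 then (k, i) else best
        | none => best)
    (-1, -1)

-- 'while True:' — the fuel only totalizes the loop (it breaks after at most |samples| rounds)
def pvA_loop (S : List (List Char)) (mo : Int) :
    Nat → List Char → PySem.Set Int → List Char
  | 0, rebuilt, _ => rebuilt
  | fuel + 1, rebuilt, used =>
    let best := pvA_select S (PySem.List.slice rebuilt (some (-150)) none) mo used
    if best.2 ≠ -1 then
      pvA_loop S mo fuel
        (rebuilt ++ PySem.List.slice (PySem.List.pyGetD S best.2 []) (some best.1) none)
        (PySem.Set.add used best.2)
    else rebuilt

def rebuild_sequence_greedy (samples : List String) (min_overlap : Int) : String :=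
  match samples with
  | [] => ""
  | s0 :: _ =>
    String.ofList (pvA_loop (samples.map String.toList) min_overlap (samples.length + 1)
      s0.toList (PySem.Set.ofList [0]))

-- ===== PORT B =====

-- 'for i, s in enumerate(samples): for k in range(0, min(len(s), 150) + 1): index.setdefault(s[:k], []).append(i)'
def pvB_index (S : List (List Char)) : PySem.Dict (List Char) (List Int) :=
  (PySem.List.enumerate S 0).foldl
    (fun d t =>
      (PySem.List.pyRange 0 (min (t.2.length : Int) 150 + 1) 1).foldl
        (fun d k => d.modify (PySem.List.slice t.2 none (some k)) [] (· ++ [t.1])) d)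
    PySem.Dict.empty

-- 'next((i for i in cands if i not in used), None)'
def pvB_firstUnused (used : PySem.Set Int) : List Int → Option Int
  | [] => none
  | i :: is => if PySem.Set.contains used i then pvB_firstUnused used is else some i

-- 'for k in range(len(tail), lo - 1, -1): cands = index.get(...); if cands: j = next(...); if j is not None: hit = (k, j); break'
def pvB_search (d : PySem.Dict (List Char) (List Int)) (used : PySem.Set Int)
    (tail : List Char) : List Int → Option (Int × Int)
  | [] => none
  | k :: ks =>
    if d.getD (PySem.List.slice tail (some ((tail.length : Int) - k)) none) [] ≠ [] then
      match pvB_firstUnused used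
          (d.getD (PySem.List.slice tail (some ((tail.length : Int) - k)) none) []) with
      | some j => some (k, j)
      | none => pvB_search d used tail ks
    else pvB_search d used tail ks

-- 'while True:' — the fuel only totalizes the loop (each round consumes a fresh index or breaks)
def pvB_loop (S : List (List Char)) (d : PySem.Dict (List Char) (List Int)) (lo : Int) :
    Nat → List Char → PySem.Set Int → List Char
  | 0, rebuilt, _ => rebuilt
  | fuel + 1, rebuilt, used =>
    let tail := PySem.List.slice rebuilt (some (-150)) none
    match pvB_search d used tail (PySem.List.pyRange (tail.length : Int) (lo - 1) (-1)) with
    | none => rebuilt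
    | some kj =>
      pvB_loop S d lo fuel
        (rebuilt ++ PySem.List.slice (PySem.List.pyGetD S kj.2 []) (some kj.1) none)
        (PySem.Set.add used kj.2)

def rebuild_sequence_greedy_alt (samples : List String) (min_overlap : Int) : String :=
  match samples with
  | [] => ""
  | s0 :: _ =>
    String.ofList (pvB_loop (samples.map String.toList)
      (pvB_index (samples.map String.toList)) (max min_overlap 0)
      (samples.length + 1) s0.toList (PySem.Set.ofList [0]))

-- ===== PRECONDITION & SPEC =====
def Spec_rebuild_sequence_greedy (samples : List String) (min_overlap : Int) (out : String) : Prop := out = rebuild_sequence_greedy_alt samples min_overlap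
instance (samples : List String) (min_overlap : Int) (out : String) : Decidable (Spec_rebuild_sequence_greedy samples min_overlap out) := by unfold Spec_rebuild_sequence_greedy; infer_instance

-- ===== CLAIM (what is proved, stated in full; the proofs are below) =====
def Claim_equal_rebuild_sequence_greedy : Prop := ∀ (samples : List String) (min_overlap : Int), Dom_rebuild_sequence_greedy samples min_overlap → Spec_rebuild_sequence_greedy samples min_overlap (rebuild_sequence_greedy samples min_overlap)

-- ===== LEMMAS AND PROOFS =====

-- 'sample i of S matches the tail with overlap length k' (the Boolean form B's index filter uses)
def pvMatchB (S : List (List Char)) (tail : List Char) (i k : Int) : Bool :=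
  (PySem.List.pyGetD S i []).take k.toNat == tail.drop (tail.length - k.toNat)

-- A's per-sample value, with the used-skip folded in
def pvVal (S : List (List Char)) (tail : List Char) (mo : Int) (used : PySem.Set Int)
    (i : Int) : Option Int :=
  if PySem.Set.contains used i then none
  else pvA_inner tail (PySem.List.pyGetD S i []) mo

-- find? on a strictly decreasing list returns the largest satisfying element
theorem pv_find_desc (l : List Int) (hl : l.Pairwise (· > ·)) (p : Int → Bool) (k : Int) :
    l.find? p = some k ↔ k ∈ l ∧ p k = true ∧ ∀ k' ∈ l, k < k' → p k' = false := by
  induction l with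
  | nil => simp
  | cons a l ih =>
    rcases List.pairwise_cons.mp hl with ⟨ha, hl'⟩
    by_cases hpa : p a = true
    · simp only [List.find?_cons, hpa, Option.some.injEq]
      constructor
      · rintro rfl
        exact ⟨List.mem_cons_self, hpa, fun k' hk' hlt => by
          rcases List.mem_cons.mp hk' with rfl | h
          · omega
          · exact absurd (ha _ h) (by omega)⟩
      · rintro ⟨hk, _, hmax⟩
        rcases List.mem_cons.mp hk with rfl | h
        · rfl
        · exact absurd hpa (by simpa using hmax a List.mem_cons_self (ha _ h))
    · simp only [List.find?_cons, Bool.not_eq_true] at hpa ⊢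
      rw [hpa, ih hl']
      constructor
      · rintro ⟨hk, hpk, hmax⟩
        exact ⟨List.mem_cons_of_mem _ hk, hpk, fun k' hk' hlt => by
          rcases List.mem_cons.mp hk' with rfl | h
          · exact hpa
          · exact hmax k' h hlt⟩
      · rintro ⟨hk, hpk, hmax⟩
        rcases List.mem_cons.mp hk with rfl | h
        · exact absurd hpk (by simp [hpa])
        · exact ⟨h, hpk, fun k' hk' hlt => hmax k' (List.mem_cons_of_mem _ hk') hlt⟩

theorem pv_pairwise_desc (a b : Int) : (PySem.List.pyRange a b (-1)).Pairwise (· > ·) := by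
  rw [PySem.List.pyRange_neg_one_eq_reverse, List.pairwise_reverse]
  exact (PySem.List.pairwise_lt_pyRange_one _ _).imp (fun h => h)

theorem pv_pred_zero (tail cur : List Char) :
    PySem.Chars.endswith tail (PySem.List.slice cur none (some 0)) = true := by
  have h0 : PySem.List.slice cur none (some 0) = cur.take (0:Int).toNat :=
    PySem.List.slice_to cur (by omega)
  rw [h0]
  simp [PySem.Chars.endswith_iff]

theorem pv_pred_nonneg (tail cur : List Char) (k : Int) (hk : 0 ≤ k) :
    PySem.Chars.endswith tail (PySem.List.slice cur none (some k))
      = decide (cur.take k.toNat <:+ tail) := by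
  rw [PySem.List.slice_to cur hk]
  by_cases h : cur.take k.toNat <:+ tail
  · simp [PySem.Chars.endswith_iff, h]
  · simp [h, ← Bool.not_eq_true, PySem.Chars.endswith_iff]

-- characterization of A's inner loop: the largest admissible overlap length
theorem pv_inner_some (tail s : List Char) (mo k : Int) :
    pvA_inner tail s mo = some k ↔
      (max mo 0 ≤ k ∧ k ≤ (tail.length : Int) ∧ k ≤ (s.length : Int) ∧
        s.take k.toNat <:+ tail ∧
        ∀ k', k < k' → k' ≤ (tail.length : Int) → k' ≤ (s.length : Int) →
          ¬ s.take k'.toNat <:+ tail) := by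
  unfold pvA_inner
  rw [pv_find_desc _ (pv_pairwise_desc _ _)]
  simp only [PySem.List.mem_pyRange_neg_one]
  constructor
  · rintro ⟨⟨hk1, hk2⟩, hpk, hmax⟩
    have hk0 : 0 ≤ k := by
      by_contra hneg
      have h0 := hmax 0 ⟨by omega, by positivity⟩ (by omega)
      rw [pv_pred_zero] at h0
      exact absurd h0 (by simp)
    rw [pv_pred_nonneg _ _ _ hk0] at hpk
    refine ⟨by omega, by omega, by omega, by simpa using hpk, ?_⟩
    intro k' h1 h2 h3 hsuf
    have := hmax k' ⟨by omega, by simp; omega⟩ h1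
    rw [pv_pred_nonneg _ _ _ (by omega)] at this
    simp [hsuf] at this
  · rintro ⟨h1, h2, h3, hsuf, hmax⟩
    have hk0 : 0 ≤ k := by omega
    refine ⟨⟨by omega, by simp; omega⟩, ?_, ?_⟩
    · rw [pv_pred_nonneg _ _ _ hk0]; simpa using hsuf
    · intro k' ⟨ha, hb⟩ hlt
      rw [pv_pred_nonneg _ _ _ (by omega)]
      simp only [decide_eq_false_iff_not]
      exact hmax k' hlt (by simp at hb; omega) (by simp at hb; omega)

theorem pv_inner_none (tail s : List Char) (mo : Int) :
    pvA_inner tail s mo = none ↔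
      ∀ k, max mo 0 ≤ k → k ≤ (tail.length : Int) → k ≤ (s.length : Int) →
        ¬ s.take k.toNat <:+ tail := by
  unfold pvA_inner
  rw [List.find?_eq_none]
  constructor
  · intro h k h1 h2 h3 hsuf
    have := h k (by rw [PySem.List.mem_pyRange_neg_one]; constructor <;> [omega; (simp; omega)])
    rw [pv_pred_nonneg _ _ _ (by omega)] at this
    simp [hsuf] at this
  · intro h k hk
    rw [PySem.List.mem_pyRange_neg_one] at hk
    by_cases hmo : mo ≤ 0
    · exact absurd (List.nil_suffix (l := tail))
        (by simpa using h 0 (by omega) (by positivity) (by positivity))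
    · rw [pv_pred_nonneg _ _ _ (by omega)]
      simp only [decide_eq_true_eq]
      exact h k (by omega) (by simp at hk; omega) (by simp at hk; omega)

theorem pv_val_nonneg (S : List (List Char)) (tail : List Char) (mo : Int)
    (used : PySem.Set Int) (i k : Int) (h : pvVal S tail mo used i = some k) : 0 ≤ k := by
  unfold pvVal at h
  split at h
  · exact absurd h (by simp)
  · have := (pv_inner_some _ _ _ _).mp h
    omega

-- characterization of A's selection fold: the maximal per-sample value, earliest index first
theorem pv_fold_char (S : List (List Char)) (tail : List Char) (mo : Int)
    (used : PySem.Set Int) (l : List Int) (hl : l.Pairwise (· < ·)) :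
    (l.foldl
        (fun best i =>
          if PySem.Set.contains used i then best
          else
            match pvA_inner tail (PySem.List.pyGetD S i []) mo with
            | some k => if k > best.1 then (k, i) else best
            | none => best)
        (-1, -1) = (-1, -1) ∧ ∀ i ∈ l, pvVal S tail mo used i = none) ∨
      (∃ K I,
        l.foldl
          (fun best i =>
            if PySem.Set.contains used i then best
            else
              match pvA_inner tail (PySem.List.pyGetD S i []) mo with
              | some k => if k > best.1 then (k, i) else best
              | none => best)
          (-1, -1) = (K, I) ∧
        I ∈ l ∧ pvVal S tail mo used I = some K ∧
        (∀ i ∈ l, ∀ k, pvVal S tail mo used i = some k → k ≤ K) ∧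
        (∀ i ∈ l, i < I → ∀ k, pvVal S tail mo used i = some k → k < K)) := by
  have hg : ∀ (best : Int × Int) (i : Int),
      (if PySem.Set.contains used i then best
        else
          match pvA_inner tail (PySem.List.pyGetD S i []) mo with
          | some k => if k > best.1 then (k, i) else best
          | none => best)
      = (match pvVal S tail mo used i with
          | some k => if k > best.1 then (k, i) else best
          | none => best) := by
    intro best i
    unfold pvVal
    split <;> rfl
  induction l using List.reverseRecOn with
  | nil => exact Or.inl ⟨rfl, by simp⟩
  | append_singleton l a ih =>
    have hla : ∀ x ∈ l, x < a := by
      intro x hx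
      exact (List.pairwise_append.mp hl).2.2 x hx a (by simp)
    have hl' : l.Pairwise (· < ·) := (List.pairwise_append.mp hl).1
    rw [List.foldl_append] at *
    rcases ih hl' with ⟨hr, hnone⟩ | ⟨K, I, hr, hI, hvI, hmax, hmin⟩
    · rw [hr, List.foldl_cons, List.foldl_nil, hg]
      rcases hva : pvVal S tail mo used a with _ | k
      · exact Or.inl ⟨rfl, fun i hi => by
          rcases List.mem_append.mp hi with h | h
          · exact hnone i h
          · simp at h; subst h; exact hva⟩
      · have hk0 : 0 ≤ k := pv_val_nonneg _ _ _ _ _ _ hva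
        dsimp only
        right
        refine ⟨k, a, by rw [if_pos (by simp; omega)], by simp, hva, ?_, ?_⟩
        · intro i hi k' hv'
          rcases List.mem_append.mp hi with h | h
          · rw [hnone i h] at hv'; exact absurd hv' (by simp)
          · simp at h; subst h; rw [hva] at hv'; simp at hv'; omega
        · intro i hi hlt k' hv'
          rcases List.mem_append.mp hi with h | h
          · rw [hnone i h] at hv'; exact absurd hv' (by simp)
          · simp at h; omega
    · rw [hr, List.foldl_cons, List.foldl_nil, hg]
      rcases hva : pvVal S tail mo used a with _ | k
      · right
        refine ⟨K, I, rfl, List.mem_append_left _ hI, hvI, ?_, ?_⟩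
        · intro i hi k' hv'
          rcases List.mem_append.mp hi with h | h
          · exact hmax i h k' hv'
          · simp at h; subst h; rw [hva] at hv'; exact absurd hv' (by simp)
        · intro i hi hlt k' hv'
          rcases List.mem_append.mp hi with h | h
          · exact hmin i h hlt k' hv'
          · simp at h; subst h; rw [hva] at hv'; exact absurd hv' (by simp)
      · by_cases hgt : k > K
        · right
          rw [show (match some k with | some k => if k > (K, I).1 then (k, a) else (K, I) | none => (K, I)) = (k, a) from by simp [hgt]]
          refine ⟨k, a, rfl, List.mem_append_right _ (by simp), hva, ?_, ?_⟩
          · intro i hi k' hv'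
            rcases List.mem_append.mp hi with h | h
            · have := hmax i h k' hv'; omega
            · simp at h; subst h; rw [hva] at hv'; simp at hv'; omega
          · intro i hi hlt k' hv'
            rcases List.mem_append.mp hi with h | h
            · have := hmax i h k' hv'; omega
            · simp at h; omega
        · right
          rw [show (match some k with | some k => if k > (K, I).1 then (k, a) else (K, I) | none => (K, I)) = (K, I) from by simp [hgt]]
          refine ⟨K, I, rfl, List.mem_append_left _ hI, hvI, ?_, ?_⟩
          · intro i hi k' hv'
            rcases List.mem_append.mp hi with h | h
            · exact hmax i h k' hv'
            · simp at h; subst h; rw [hva] at hv'; simp at hv'; omega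
          · intro i hi hlt k' hv'
            rcases List.mem_append.mp hi with h | h
            · exact hmin i h hlt k' hv'
            · simp at h; subst h
              exact absurd (hla I hI) (by omega)

-- filter of a unit-step range whose predicate holds (inside the range) at a single point
theorem pv_filter_range_single (c : Int) (p : Int → Bool) (a b : Int)
    (h : ∀ k, a ≤ k → k < b → (p k = true ↔ k = c)) :
    (PySem.List.pyRange a b 1).filter p = if a ≤ c ∧ c < b then [c] else [] := by
  by_cases hab : a < b
  · induction hn : (b - a).toNat generalizing a with
    | zero => omega
    | succ n ih =>
      rw [PySem.List.pyRange_one_cons hab, List.filter_cons]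
      by_cases hpa : p a = true
      · have hac : a = c := (h a (le_refl _) hab).mp hpa
        subst hac
        rw [if_pos hpa, if_pos ⟨le_refl _, hab⟩]
        congr 1
        rw [List.filter_eq_nil_iff]
        intro k hk
        rw [PySem.List.mem_pyRange_one] at hk
        simp only [Bool.not_eq_true]
        by_contra hcon
        have := (h k (by omega) (by omega)).mp (by simpa using hcon)
        omega
      · rw [if_neg hpa]
        have hac : a ≠ c := fun hac => hpa (by rw [(h a (le_refl _) hab)]; exact hac)
        by_cases hab' : a + 1 < b
        · rw [ih (a+1) (fun k h1 h2 => h k (by omega) h2) hab' (by omega)]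
          by_cases hc : a + 1 ≤ c ∧ c < b
          · rw [if_pos hc, if_pos (by omega)]
          · rw [if_neg hc, if_neg (by omega)]
        · rw [PySem.List.pyRange_one_eq_nil (by omega), List.filter_nil,
            if_neg (by omega)]
  · rw [PySem.List.pyRange_one_eq_nil (by omega), List.filter_nil, if_neg (by omega)]

theorem pv_filter_eq_flatMap {α : Type} (l : List α) (p : α → Bool) :
    l.filter p = l.flatMap (fun x => if p x then [x] else []) := by
  induction l with
  | nil => rfl
  | cons a l ih =>
    rw [List.filter_cons, List.flatMap_cons, ← ih]
    by_cases hpa : p a = true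
    · rw [if_pos hpa, if_pos hpa]; rfl
    · rw [if_neg hpa, if_neg hpa]; rfl

-- the prefix index: looking up a (≤ 150)-character string returns the ascending list of
-- indices of the samples having it as a prefix
theorem pv_index_getD (S : List (List Char)) (p : List Char) (hp : p.length ≤ 150) :
    (pvB_index S).getD p [] =
      (PySem.List.pyRange 0 (S.length : Int) 1).filter
        (fun i => (PySem.List.pyGetD S i []).take p.length == p) := by
  have hidx : pvB_index S =
      ((PySem.List.enumerate S 0).flatMap
        (fun t => (PySem.List.pyRange 0 (min (t.2.length : Int) 150 + 1) 1).map
          (fun k => (PySem.List.slice t.2 none (some k), t.1)))).foldl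
        (fun d q => d.modify q.1 [] (· ++ [q.2])) PySem.Dict.empty := by
    rw [List.foldl_flatMap]
    unfold pvB_index
    congr 1
    funext d t
    rw [List.foldl_map]
  rw [hidx, PySem.Dict.getD_foldl_modify_append, PySem.Dict.getD_empty, List.nil_append,
    List.filter_flatMap, List.map_flatMap]
  have hinner : ∀ t : Int × List Char,
      (((PySem.List.pyRange 0 (min (t.2.length : Int) 150 + 1) 1).map
          (fun k => (PySem.List.slice t.2 none (some k), t.1))).filter
        (fun q => q.1 == p)).map (·.2)
      = if t.2.take p.length == p then [t.1] else [] := by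
    intro t
    rw [List.filter_map, List.map_map]
    by_cases hpre : t.2.take p.length = p
    · have hlen : p.length ≤ t.2.length := by
        have := congrArg List.length hpre
        simp at this
        omega
      rw [pv_filter_range_single (p.length : Int) _ 0 _ ?_]
      · rw [if_pos (by constructor <;> [positivity; (simp; omega)])]
        simp [hpre]
      · intro k hk0 hkb
        simp only [Function.comp, beq_iff_eq]
        constructor
        · intro hkeq
          rw [PySem.List.slice_to _ hk0] at hkeq
          have := congrArg List.length hkeq
          simp at this hkb
          omega
        · rintro rfl
          rw [PySem.List.slice_to _ (by positivity)]
          simpa using hpre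
    · rw [List.filter_eq_nil_iff.mpr ?_, List.map_nil, if_neg (by simpa using hpre)]
      intro k hk
      rw [PySem.List.mem_pyRange_one] at hk
      simp only [Function.comp, beq_iff_eq]
      intro hkeq
      rw [PySem.List.slice_to _ (by omega)] at hkeq
      have hk2 : k.toNat ≤ t.2.length := by omega
      have hkp : k.toNat = p.length := by
        have := congrArg List.length hkeq
        rw [List.length_take, min_eq_left hk2] at this
        exact this
      exact hpre (by rw [← hkp]; exact hkeq)
  simp only [hinner]
  rw [pv_filter_eq_flatMap]
  rw [PySem.List.enumerate_eq_map_pyRange (d := []), List.flatMap_map]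
  simp [PySem.List.len_eq]

-- first unused element of an ascending candidate list = the least unused one
theorem pv_firstUnused_some (used : PySem.Set Int) (l : List Int)
    (hl : l.Pairwise (· < ·)) (j : Int) :
    pvB_firstUnused used l = some j ↔
      j ∈ l ∧ PySem.Set.contains used j = false ∧
        ∀ i ∈ l, i < j → PySem.Set.contains used i = true := by
  induction l with
  | nil => simp [pvB_firstUnused]
  | cons a l ih =>
    rcases List.pairwise_cons.mp hl with ⟨ha, hl'⟩
    unfold pvB_firstUnused
    by_cases hu : PySem.Set.contains used a = true
    · rw [if_pos hu, ih hl']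
      constructor
      · rintro ⟨h1, h2, h3⟩
        refine ⟨List.mem_cons_of_mem _ h1, h2, ?_⟩
        intro i hi hlt
        rcases List.mem_cons.mp hi with rfl | h
        · exact hu
        · exact h3 i h hlt
      · rintro ⟨h1, h2, h3⟩
        rcases List.mem_cons.mp h1 with rfl | h
        · rw [hu] at h2; cases h2
        · exact ⟨h, h2, fun i hi hlt => h3 i (List.mem_cons_of_mem _ hi) hlt⟩
    · rw [if_neg hu]
      constructor
      · rintro h
        injection h with h
        subst h
        exact ⟨List.mem_cons_self, by simpa using hu, fun i hi hlt => by
          rcases List.mem_cons.mp hi with rfl | h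
          · omega
          · exact absurd (ha i h) (by omega)⟩
      · rintro ⟨h1, h2, h3⟩
        rcases List.mem_cons.mp h1 with rfl | h
        · rfl
        · exact absurd (h3 a List.mem_cons_self (ha j h)) (by simpa using hu)

theorem pv_firstUnused_none (used : PySem.Set Int) (l : List Int) :
    pvB_firstUnused used l = none ↔ ∀ i ∈ l, PySem.Set.contains used i = true := by
  induction l with
  | nil => simp [pvB_firstUnused]
  | cons a l ih =>
    unfold pvB_firstUnused
    by_cases hu : PySem.Set.contains used a = true
    · rw [if_pos hu, ih]
      constructor
      · intro h i hi
        rcases List.mem_cons.mp hi with rfl | h' <;> [exact hu; exact h i h']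
      · intro h i hi
        exact h i (List.mem_cons_of_mem _ hi)
    · rw [if_neg hu]
      constructor
      · intro h; cases h
      · intro h
        exact absurd (h a List.mem_cons_self) hu

-- the Boolean prefix test against what A's suffix test states
theorem pv_matchB_iff (S : List (List Char)) (tail : List Char) (i k : Int)
    (hk0 : 0 ≤ k) (hk1 : k ≤ (tail.length : Int)) :
    pvMatchB S tail i k = true ↔
      (k ≤ ((PySem.List.pyGetD S i []).length : Int) ∧
        (PySem.List.pyGetD S i []).take k.toNat <:+ tail) := by
  unfold pvMatchB
  set s := PySem.List.pyGetD S i [] with hs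
  have hkT : k.toNat ≤ tail.length := by omega
  have hdlen : (tail.drop (tail.length - k.toNat)).length = k.toNat := by
    rw [List.length_drop]
    omega
  rw [beq_iff_eq]
  constructor
  · intro heq
    have hlen := congrArg List.length heq
    rw [List.length_take, hdlen] at hlen
    refine ⟨by omega, ?_⟩
    rw [heq]
    exact List.drop_suffix _ _
  · rintro ⟨hle, hsuf⟩
    have htk : (s.take k.toNat).length = k.toNat := by
      rw [List.length_take]
      omega
    rw [List.suffix_iff_eq_drop.mp hsuf, htk]

-- one candidate list of B, described through pvMatchB
theorem pv_cands_eq (S : List (List Char)) (tail : List Char) (htail : tail.length ≤ 150)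
    (k : Int) (hk0 : 0 ≤ k) (hk1 : k ≤ (tail.length : Int)) :
    (pvB_index S).getD (PySem.List.slice tail (some ((tail.length : Int) - k)) none) [] =
      (PySem.List.pyRange 0 (S.length : Int) 1).filter (fun i => pvMatchB S tail i k) := by
  have hkey : PySem.List.slice tail (some ((tail.length : Int) - k)) none
      = tail.drop (tail.length - k.toNat) := by
    rw [PySem.List.slice_from _ (by omega)]
    congr 1
    omega
  rw [hkey]
  have hdlen : (tail.drop (tail.length - k.toNat)).length = k.toNat := by
    rw [List.length_drop]
    omega
  rw [pv_index_getD S _ (by omega)]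
  congr 1
  funext i
  unfold pvMatchB
  rw [hdlen]

-- B's search succeeds exactly on A's selected pair
theorem pv_search_eq_some (d : PySem.Dict (List Char) (List Int)) (used : PySem.Set Int)
    (tail : List Char) (l : List Int) (hl : l.Pairwise (· > ·)) (K I : Int)
    (hmem : K ∈ l)
    (hK : pvB_firstUnused used
      (d.getD (PySem.List.slice tail (some ((tail.length : Int) - K)) none) []) = some I)
    (habove : ∀ k ∈ l, K < k →
      pvB_firstUnused used
        (d.getD (PySem.List.slice tail (some ((tail.length : Int) - k)) none) []) = none) :
    pvB_search d used tail l = some (K, I) := by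
  induction l with
  | nil => cases hmem
  | cons a l ih =>
    rcases List.pairwise_cons.mp hl with ⟨ha, hl'⟩
    unfold pvB_search
    rcases List.mem_cons.mp hmem with rfl | hKl
    · rw [hK]
      split
      · rfl
      · rename_i hne
        rw [not_not] at hne
        rw [hne] at hK
        simp [pvB_firstUnused] at hK
    · have haK : K < a := ha K hKl
      have hnone := habove a List.mem_cons_self haK
      rw [hnone]
      have := ih hl' hKl (fun k hk hlt => habove k (List.mem_cons_of_mem _ hk) hlt)
      split <;> exact this

theorem pv_search_eq_none (d : PySem.Dict (List Char) (List Int)) (used : PySem.Set Int)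
    (tail : List Char) (l : List Int)
    (h : ∀ k ∈ l, pvB_firstUnused used
      (d.getD (PySem.List.slice tail (some ((tail.length : Int) - k)) none) []) = none) :
    pvB_search d used tail l = none := by
  induction l with
  | nil => rfl
  | cons a l ih =>
    unfold pvB_search
    rw [h a List.mem_cons_self]
    have := ih (fun k hk => h k (List.mem_cons_of_mem _ hk))
    split <;> exact this

-- an unused sample matching at overlap k has an A-value, and it is at least k
theorem pv_val_ge (S : List (List Char)) (tail : List Char) (mo : Int)
    (used : PySem.Set Int) (i k : Int)
    (hu : PySem.Set.contains used i = false)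
    (hlo : max mo 0 ≤ k) (hk1 : k ≤ (tail.length : Int))
    (hks : k ≤ ((PySem.List.pyGetD S i []).length : Int))
    (hsuf : (PySem.List.pyGetD S i []).take k.toNat <:+ tail) :
    ∃ ki, pvVal S tail mo used i = some ki ∧ k ≤ ki := by
  unfold pvVal
  rw [if_neg (by rw [hu]; simp)]
  rcases hv : pvA_inner tail (PySem.List.pyGetD S i []) mo with _ | ki
  · rw [pv_inner_none] at hv
    exact absurd hsuf (hv k hlo hk1 hks)
  · refine ⟨ki, rfl, ?_⟩
    have hc := (pv_inner_some _ _ _ _).mp hv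
    by_contra hlt
    exact hc.2.2.2.2 k (by omega) hk1 hks hsuf

-- the round equivalence: A's quadratic selection = B's indexed descending search
theorem pv_round (S : List (List Char)) (tail : List Char) (htail : tail.length ≤ 150)
    (mo : Int) (used : PySem.Set Int) :
    (pvA_select S tail mo used
        = match pvB_search (pvB_index S) used tail
            (PySem.List.pyRange (tail.length : Int) (max mo 0 - 1) (-1)) with
          | none => (-1, -1)
          | some kj => kj) ∧
      (∀ kj, pvB_search (pvB_index S) used tail
          (PySem.List.pyRange (tail.length : Int) (max mo 0 - 1) (-1)) = some kj → 0 ≤ kj.2) := by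
  have hsel : pvA_select S tail mo used
      = (PySem.List.pyRange 0 (S.length : Int) 1).foldl
          (fun best i =>
            if PySem.Set.contains used i then best
            else
              match pvA_inner tail (PySem.List.pyGetD S i []) mo with
              | some k => if k > best.1 then (k, i) else best
              | none => best)
          (-1, -1) := rfl
  have hcands : ∀ k, 0 ≤ k → k ≤ (tail.length : Int) →
      (pvB_index S).getD (PySem.List.slice tail (some ((tail.length : Int) - k)) none) []
        = (PySem.List.pyRange 0 (S.length : Int) 1).filter (fun i => pvMatchB S tail i k) :=
    fun k h0 h1 => pv_cands_eq S tail htail k h0 h1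
  rcases pv_fold_char S tail mo used (PySem.List.pyRange 0 (S.length : Int) 1)
      ((PySem.List.pairwise_lt_pyRange_one _ _).imp (fun h => h)) with
    ⟨hr, hnone⟩ | ⟨K, I, hr, hI, hvI, hmax, hmin⟩
  · have hsearch : pvB_search (pvB_index S) used tail
        (PySem.List.pyRange (tail.length : Int) (max mo 0 - 1) (-1)) = none := by
      apply pv_search_eq_none
      intro k hk
      rw [PySem.List.mem_pyRange_neg_one] at hk
      rw [hcands k (by omega) hk.2, pv_firstUnused_none]
      intro i hi
      rw [List.mem_filter] at hi
      by_contra hu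
      rw [Bool.not_eq_true] at hu
      have hm := (pv_matchB_iff S tail i k (by omega) hk.2).mp hi.2
      obtain ⟨ki, hki, _⟩ := pv_val_ge S tail mo used i k hu (by omega) hk.2 hm.1 hm.2
      rw [hnone i hi.1] at hki
      cases hki
    rw [hsearch]
    exact ⟨hsel.trans hr, fun kj hkj => by cases hkj⟩
  · have hIu : PySem.Set.contains used I = false ∧
        pvA_inner tail (PySem.List.pyGetD S I []) mo = some K := by
      unfold pvVal at hvI
      split at hvI
      · cases hvI
      · exact ⟨by rename_i h; simpa using h, hvI⟩
    have hKc := (pv_inner_some _ _ _ _).mp hIu.2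
    have hsearch : pvB_search (pvB_index S) used tail
        (PySem.List.pyRange (tail.length : Int) (max mo 0 - 1) (-1)) = some (K, I) := by
      apply pv_search_eq_some _ _ _ _ (pv_pairwise_desc _ _)
      · rw [PySem.List.mem_pyRange_neg_one]
        omega
      · rw [hcands K (by omega) (by omega)]
        rw [pv_firstUnused_some _ _ (((PySem.List.pairwise_lt_pyRange_one _ _).imp (fun h => h)).filter _)]
        refine ⟨List.mem_filter.mpr ⟨hI, (pv_matchB_iff S tail I K (by omega) (by omega)).mpr
          ⟨hKc.2.2.1, hKc.2.2.2.1⟩⟩, hIu.1, ?_⟩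
        intro i hi hlt
        rw [List.mem_filter] at hi
        by_contra hu
        rw [Bool.not_eq_true] at hu
        have hm := (pv_matchB_iff S tail i K (by omega) (by omega)).mp hi.2
        obtain ⟨ki, hki, hge⟩ := pv_val_ge S tail mo used i K hu (by omega) (by omega) hm.1 hm.2
        have := hmin i hi.1 hlt ki hki
        omega
      · intro k hk hlt
        rw [PySem.List.mem_pyRange_neg_one] at hk
        rw [hcands k (by omega) hk.2, pv_firstUnused_none]
        intro i hi
        rw [List.mem_filter] at hi
        by_contra hu
        rw [Bool.not_eq_true] at hu
        have hm := (pv_matchB_iff S tail i k (by omega) hk.2).mp hi.2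
        obtain ⟨ki, hki, hge⟩ := pv_val_ge S tail mo used i k hu (by omega) hk.2 hm.1 hm.2
        have := hmax i hi.1 ki hki
        omega
    rw [hsearch]
    refine ⟨hsel.trans hr, fun kj hkj => ?_⟩
    injection hkj with hkj
    subst hkj
    rw [PySem.List.mem_pyRange_one] at hI
    exact hI.1

theorem pv_tail_short (rebuilt : List Char) :
    (PySem.List.slice rebuilt (some (-150)) none).length ≤ 150 := by
  rw [PySem.List.slice_from_neg_ofNat rebuilt 150 (by omega), List.length_drop]
  omega

-- the loops agree round for round
theorem pv_loop_eq (S : List (List Char)) (mo : Int) (fuel : Nat) :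
    ∀ (rebuilt : List Char) (used : PySem.Set Int),
    pvA_loop S mo fuel rebuilt used
      = pvB_loop S (pvB_index S) (max mo 0) fuel rebuilt used := by
  induction fuel with
  | zero => intro rebuilt used; rfl
  | succ fuel ih =>
    intro rebuilt used
    simp only [pvA_loop, pvB_loop]
    obtain ⟨hrel, hpos⟩ := pv_round S (PySem.List.slice rebuilt (some (-150)) none)
      (pv_tail_short rebuilt) mo used
    rcases hsearch : pvB_search (pvB_index S) used
        (PySem.List.slice rebuilt (some (-150)) none)
        (PySem.List.pyRange ((PySem.List.slice rebuilt (some (-150)) none).length : Int)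
          (max mo 0 - 1) (-1)) with _ | kj
    · rw [hsearch] at hrel
      have hrel' : pvA_select S (PySem.List.slice rebuilt (some (-150)) none) mo used
          = (-1, -1) := hrel
      rw [hrel']
      simp
    · rw [hsearch] at hrel
      have hrel' : pvA_select S (PySem.List.slice rebuilt (some (-150)) none) mo used
          = kj := hrel
      rw [hrel']
      have h2 := hpos kj hsearch
      rw [if_pos (by omega)]
      exact ih _ _

-- ===== VERDICT (by name: the statement is the Claim_ definition above) =====
theorem rebuild_sequence_greedy_spec : Claim_equal_rebuild_sequence_greedy := by
  intro samples mo _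
  unfold Spec_rebuild_sequence_greedy rebuild_sequence_greedy rebuild_sequence_greedy_alt
  cases samples with
  | nil => rfl
  | cons s0 rest =>
    dsimp only
    rw [pv_loop_eq]
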